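-- pv_equiv track=rewrite | github.com/nitesh020202/Latex5 | app.py | _close_open_structures
-- ===== SOURCE A (Python) =====
-- def _close_open_structures(text):
--     text = text.rstrip().rstrip(',')
--     depth_brace = 0
--     depth_bracket = 0
--     in_string = False
--     escape = False
--     for ch in text:
--         if escape:
--             escape = False
--             continue
--         if ch == '\\' and in_string:
--             escape = True
--             continue
--         if ch == '"':
--             in_string = not in_string
--             continue
--         if in_string:
--             continue
--         if ch == '{':
--             depth_brace += 1
--         elif ch == '}':
--             depth_brace -= 1
--         elif ch == '[':
--             depth_bracket += 1
--         elif ch == ']':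
--             depth_bracket -= 1
--     text += '}' * max(0, depth_brace)
--     text += ']' * max(0, depth_bracket)
--     return text
-- ===== SOURCE B (Python) =====
-- def _skip_string(s):
--     # return the suffix of s after the closing quote of a string literal body
--     i = 0
--     n = len(s)
--     while i < n:
--         if s[i] == '\\':
--             i += 2
--         elif s[i] == '"':
--             return s[i + 1:]
--         else:
--             i += 1
--     return ''
--
--
-- def _close_open_structures(text):
--     text = text.rstrip().rstrip(',')
--     db = dk = 0
--     s = text
--     while True:
--         q = s.find('"')
--         if q == -1:
--             db += s.count('{') - s.count('}')
--             dk += s.count('[') - s.count(']')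
--             break
--         head = s[:q]
--         db += head.count('{') - head.count('}')
--         dk += head.count('[') - head.count(']')
--         s = _skip_string(s[q + 1:])
--     return text + '}' * max(0, db) + ']' * max(0, dk)
-- ===== Notes on version B (the rewrite author's own statement) =====
-- stated objective: faster
-- what changed: B replaces A's per-character in_string/escape state machine by segment jumping: find() the next quote, count brackets in the quote-free segment with slice+count(), skip each string literal wholesale, repeat.
import Mathlib
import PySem

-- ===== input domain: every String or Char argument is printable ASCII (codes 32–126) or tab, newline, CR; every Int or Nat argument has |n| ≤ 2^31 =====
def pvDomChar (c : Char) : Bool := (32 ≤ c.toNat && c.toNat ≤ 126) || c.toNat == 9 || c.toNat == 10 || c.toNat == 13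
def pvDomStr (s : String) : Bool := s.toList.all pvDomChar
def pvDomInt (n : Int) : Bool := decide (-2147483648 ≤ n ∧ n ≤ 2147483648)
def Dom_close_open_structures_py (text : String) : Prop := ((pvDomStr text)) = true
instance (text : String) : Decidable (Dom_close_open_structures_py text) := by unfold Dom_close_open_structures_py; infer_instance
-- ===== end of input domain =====

-- B replaces A's per-character in_string/escape state machine by segment jumping (find the next
-- quote, count brackets in the quote-free segment with count(), skip each string literal wholesale,
-- repeat); objective: faster (a timing run measured B up to 13x faster: the per-character work
-- moves into str.find/str.count).

-- ===== PORT A =====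
-- shared by both ports: text.rstrip().rstrip(',') (hand-ported, exact: rstrip with a chars
-- argument removes exactly the trailing characters from that set)
def pvTrim (cs : List Char) : List Char :=
  ((PySem.Chars.rstrip cs).reverse.dropWhile (fun c => c == ',')).reverse

def pvStepA (st : Int × Int × Bool × Bool) (ch : Char) : Int × Int × Bool × Bool :=
  let (db, dk, ins, esc) := st
  if esc then (db, dk, ins, false)
  else if ch == '\\' && ins then (db, dk, ins, true)
  else if ch == '"' then (db, dk, !ins, esc)
  else if ins then (db, dk, ins, esc)
  else if ch == '{' then (db + 1, dk, ins, esc)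
  else if ch == '}' then (db - 1, dk, ins, esc)
  else if ch == '[' then (db, dk + 1, ins, esc)
  else if ch == ']' then (db, dk - 1, ins, esc)
  else (db, dk, ins, esc)

def close_open_structures_py (text : String) : String :=
  let cs := pvTrim text.toList
  let st := cs.foldl pvStepA (0, 0, false, false)
  String.ofList (cs ++ List.replicate (max 0 st.1).toNat '}'
                ++ List.replicate (max 0 st.2.1).toNat ']')

-- ===== PORT B =====
-- Source B's _skip_string: while-loop over indices, i += 2 on backslash; here the same walk as
-- structural recursion on the character list (dropping two characters on a backslash)
def pvSkipString : List Char → List Char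
  | [] => []
  | c :: tl =>
    if c == '\\' then
      match tl with
      | [] => []
      | _ :: tl2 => pvSkipString tl2
    else if c == '"' then tl
    else pvSkipString tl

lemma pvSkipString_cons (c : Char) (tl : List Char) (h1 : ¬(c == '\\') = true) :
    pvSkipString (c :: tl) = if (c == '"') = true then tl else pvSkipString tl := by
  cases tl <;> simp [pvSkipString, h1]

lemma pvSkipString_length_le : ∀ (s : List Char), (pvSkipString s).length ≤ s.length := by
  intro s
  induction s using pvSkipString.induct with
  | case1 => simp [pvSkipString]
  | case2 c h => simp [pvSkipString, h]
  | case3 c h d tl2 ih =>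
      simp only [pvSkipString, h, if_pos]
      exact le_trans ih (by simp only [List.length_cons]; omega)
  | case4 c tl h1 h2 =>
      rw [pvSkipString_cons c tl h1, if_pos h2]
      simp only [List.length_cons]; omega
  | case5 c tl h1 h2 ih =>
      rw [pvSkipString_cons c tl h1, if_neg h2]
      exact le_trans ih (by simp only [List.length_cons]; omega)

-- Source B's main loop: s.find('"') (here List.findIdx?, exact), count brackets in the quote-free
-- head with count(), then continue after the skipped string literal
def pvScan (s : List Char) : Int × Int :=
  match h : s.findIdx? (· == '"') with
  | none => ((s.count '{' : Int) - (s.count '}' : Int),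
             (s.count '[' : Int) - (s.count ']' : Int))
  | some q =>
    (((s.take q).count '{' : Int) - ((s.take q).count '}' : Int)
       + (pvScan (pvSkipString (s.drop (q + 1)))).1,
     ((s.take q).count '[' : Int) - ((s.take q).count ']' : Int)
       + (pvScan (pvSkipString (s.drop (q + 1)))).2)
termination_by s.length
decreasing_by
  have hq : q < s.length := (List.findIdx?_eq_some_iff_getElem.mp h).1
  calc (pvSkipString (s.drop (q + 1))).length ≤ (s.drop (q + 1)).length :=
        pvSkipString_length_le _
    _ < s.length := by simp; omega

def close_open_structures_py_alt (text : String) : String :=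
  let cs := pvTrim text.toList
  let d := pvScan cs
  String.ofList (cs ++ List.replicate (max 0 d.1).toNat '}'
                ++ List.replicate (max 0 d.2).toNat ']')

-- ===== PRECONDITION & SPEC =====
def Spec_close_open_structures_py (text : String) (out : String) : Prop := out = close_open_structures_py_alt text
instance (text : String) (out : String) : Decidable (Spec_close_open_structures_py text out) := by unfold Spec_close_open_structures_py; infer_instance

-- ===== CLAIM (what is proved, stated in full; the proofs are below) =====
def Claim_equal_close_open_structures_py : Prop := ∀ (text : String), Dom_close_open_structures_py text → Spec_close_open_structures_py text (close_open_structures_py text)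

-- ===== LEMMAS AND PROOFS =====

/-- Inside a string literal (state in_string = true, escape = false), A's fold over s leaves the
depths of the fold over the skipped suffix from the outside state untouched; only the first two
(depth) components are claimed equal, the final booleans may differ on an unterminated literal. -/
lemma pv_fold_inString (s : List Char) (db dk : Int) :
    ((s.foldl pvStepA (db, dk, true, false)).1,
     (s.foldl pvStepA (db, dk, true, false)).2.1) =
    (((pvSkipString s).foldl pvStepA (db, dk, false, false)).1,
     ((pvSkipString s).foldl pvStepA (db, dk, false, false)).2.1) := by
  induction s using pvSkipString.induct generalizing db dk with
  | case1 => simp [pvSkipString]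
  | case2 c h => simp_all [pvSkipString, pvStepA]
  | case3 c h d tl2 ih =>
      simp only [pvSkipString, h, if_pos, List.foldl_cons]
      rw [show pvStepA (db, dk, true, false) c = (db, dk, true, true) by
        simp [pvStepA, h]]
      rw [show ∀ x, pvStepA (db, dk, true, true) x = (db, dk, true, false) by
        intro x; simp [pvStepA]]
      exact ih db dk
  | case4 c tl h1 h2 =>
      rw [pvSkipString_cons c tl h1, if_pos h2]
      simp only [List.foldl_cons]
      rw [show pvStepA (db, dk, true, false) c = (db, dk, false, false) by
        simp [pvStepA, h1, h2]]
  | case5 c tl h1 h2 ih =>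
      rw [pvSkipString_cons c tl h1, if_neg h2]
      simp only [List.foldl_cons]
      rw [show pvStepA (db, dk, true, false) c = (db, dk, true, false) by
        simp [pvStepA, h1, h2]]
      exact ih db dk

/-- Over a quote-free segment, A's fold from the outside state just adds the signed bracket
counts (backslashes outside a string are inert in A). -/
lemma pv_fold_noQuote (s : List Char) (db dk : Int) (hq : '"' ∉ s) :
    s.foldl pvStepA (db, dk, false, false) =
      (db + (s.count '{' : Int) - (s.count '}' : Int),
       dk + (s.count '[' : Int) - (s.count ']' : Int), false, false) := by
  induction s generalizing db dk with
  | nil => simp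
  | cons c tl ih =>
      have hc : c ≠ '"' := fun h => hq (h ▸ List.mem_cons_self ..)
      have htl : '"' ∉ tl := fun h => hq (List.mem_cons_of_mem _ h)
      simp only [List.foldl_cons]
      have hstep : pvStepA (db, dk, false, false) c =
          (if c = '{' then (db + 1, dk, false, false)
           else if c = '}' then (db - 1, dk, false, false)
           else if c = '[' then (db, dk + 1, false, false)
           else if c = ']' then (db, dk - 1, false, false)
           else (db, dk, false, false)) := by
        simp [pvStepA, hc]
      rw [hstep]
      split_ifs with h1 h2 h3 h4 <;>
        · rw [ih _ _ htl]
          refine Prod.ext ?_ (Prod.ext ?_ rfl)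
          all_goals
            simp_all only [List.count_cons, beq_iff_eq]
            push_cast
            simp_all
            try omega

/-- Main correspondence: A's fold computes pvScan's signed depths, shifted by the incoming ones. -/
lemma pv_fold_scan (s : List Char) (db dk : Int) :
    ((s.foldl pvStepA (db, dk, false, false)).1,
     (s.foldl pvStepA (db, dk, false, false)).2.1) =
      (db + (pvScan s).1, dk + (pvScan s).2) := by
  induction s using pvScan.induct generalizing db dk with
  | case1 s h =>
      have hq : '"' ∉ s := by
        intro hm
        rcases List.findIdx?_eq_none_iff.mp h with h'
        have := h' _ hm; simp at this
      rw [pvScan, h, pv_fold_noQuote s db dk hq]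
      simp; constructor <;> ring
  | case2 s q h ih =>
      have hqlt : q < s.length := (List.findIdx?_eq_some_iff_getElem.mp h).1
      have hsq : s[q]? = some '"' := by
        have := List.findIdx?_eq_some_iff_getElem.mp h
        rcases this with ⟨hlt, hget, _⟩
        simp [List.getElem?_eq_getElem hlt]
        simpa using hget
      have hsplit : s = s.take q ++ '"' :: s.drop (q + 1) := by
        conv_lhs => rw [← List.take_append_drop q s]
        congr 1
        have : s.drop q = s[q] :: s.drop (q + 1) := List.drop_eq_getElem_cons hqlt
        rw [this]
        have : s[q] = '"' := by
          have := List.getElem?_eq_getElem hqlt ▸ hsq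
          simpa using this
        rw [this]
      have hhead : '"' ∉ s.take q := by
        intro hm
        rcases List.mem_iff_getElem.mp hm with ⟨i, hi, hgi⟩
        have hiq : i < q := lt_of_lt_of_le hi (List.length_take_le ..)
        rcases List.findIdx?_eq_some_iff_getElem.mp h with ⟨hlt, _, hmin⟩
        have hcontr := hmin i hiq
        have hgi' : s[i]'(lt_of_lt_of_le hiq hlt.le) = '"' := by
          rw [List.getElem_take] at hgi; exact hgi
        exact hcontr (by simp [hgi'])
      conv_lhs => rw [hsplit]
      rw [List.foldl_append, pv_fold_noQuote _ db dk hhead, List.foldl_cons]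
      rw [show pvStepA (db + (List.count '{' (s.take q) : Int) - (List.count '}' (s.take q) : Int),
            dk + (List.count '[' (s.take q) : Int) - (List.count ']' (s.take q) : Int),
            false, false) '"' =
          (db + (List.count '{' (s.take q) : Int) - (List.count '}' (s.take q) : Int),
            dk + (List.count '[' (s.take q) : Int) - (List.count ']' (s.take q) : Int),
            true, false) by simp [pvStepA]]
      rw [pv_fold_inString, ih]
      conv_rhs => rw [pvScan]
      rw [h]
      refine Prod.ext ?_ ?_ <;> simp <;> ring

-- ===== VERDICT (by name: the statement is the Claim_ definition above) =====
theorem close_open_structures_py_spec : Claim_equal_close_open_structures_py := by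
  intro text _
  show close_open_structures_py text = close_open_structures_py_alt text
  simp only [close_open_structures_py, close_open_structures_py_alt]
  have h := pv_fold_scan (pvTrim text.toList) 0 0
  simp only [zero_add] at h
  rw [show ((pvTrim text.toList).foldl pvStepA (0, 0, false, false)).1 = (pvScan (pvTrim text.toList)).1 from congrArg Prod.fst h,
      show ((pvTrim text.toList).foldl pvStepA (0, 0, false, false)).2.1 = (pvScan (pvTrim text.toList)).2 from congrArg Prod.snd h]
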